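-- pv_equiv track=rewrite | github.com/bhahohocrzmoto/Stand_28.11.2025 | SpiralGeometryGeneration/Spiral_Drawer_updated.py | _normalize_layer_dirs
-- ===== SOURCE A (Python) =====
-- from typing import List, Tuple, Optional
--
-- def _normalize_layer_dirs(M_layers: int, user_dirs: Optional[List[str]]) -> List[str]:
--     """Return a sanitized chirality list (length = M_layers)."""
--
--     M = int(M_layers)
--     if M <= 0:
--         return []
--
--     dirs: List[str] = []
--     for idx in range(M):
--         if user_dirs and idx < len(user_dirs):
--             raw = str(user_dirs[idx]).strip().upper()
--             if raw not in ("CCW", "CW"):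
--                 raise ValueError("Layer direction entries must be 'CCW' or 'CW'.")
--             dirs.append(raw)
--         else:
--             dirs.append("CCW")
--     return dirs
-- ===== SOURCE B (Python) =====
-- from typing import List, Optional
--
-- def _normalize_layer_dirs(M_layers: int, user_dirs: Optional[List[str]]) -> List[str]:
--     """Return a sanitized chirality list (length = M_layers)."""
--
--     def go(k: int, lst: List[str]) -> List[str]:
--         if k <= 0:
--             return []
--         if lst:
--             raw = str(lst[0]).strip().upper()
--             if raw not in ("CCW", "CW"):
--                 raise ValueError("Layer direction entries must be 'CCW' or 'CW'.")
--             return [raw] + go(k - 1, lst[1:])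
--         return ["CCW"] * k
--
--     return go(int(M_layers), list(user_dirs) if user_dirs else [])
-- ===== Notes on version B (the rewrite author's own statement) =====
-- stated objective: alternative
-- what changed: Replaces A's iterative range(M) loop with an index branch by structural recursion on (remaining slots, remaining entries): consume and validate the head entry, recurse on the tail, and stop with a replicate of the default when the entries run out.
import Mathlib
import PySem

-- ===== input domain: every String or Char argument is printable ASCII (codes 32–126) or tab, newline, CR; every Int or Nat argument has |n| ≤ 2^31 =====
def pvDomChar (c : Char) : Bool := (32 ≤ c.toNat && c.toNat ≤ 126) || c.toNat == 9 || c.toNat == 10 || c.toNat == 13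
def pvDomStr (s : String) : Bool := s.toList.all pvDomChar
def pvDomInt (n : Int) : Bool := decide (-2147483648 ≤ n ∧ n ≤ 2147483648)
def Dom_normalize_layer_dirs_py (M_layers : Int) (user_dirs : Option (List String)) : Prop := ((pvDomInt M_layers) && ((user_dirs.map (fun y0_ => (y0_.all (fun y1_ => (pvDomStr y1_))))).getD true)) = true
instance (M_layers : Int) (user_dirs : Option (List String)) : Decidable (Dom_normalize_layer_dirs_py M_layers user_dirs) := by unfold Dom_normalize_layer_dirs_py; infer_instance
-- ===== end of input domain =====

-- B replaces A's iterative range(M) loop with an index branch by structural recursion on the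
-- (remaining slots, remaining entries) pair — a different decomposition, same cost.


-- ===== PORT A =====
-- literal port of A's range(M) loop; at the Python `raise ValueError` point (raw not in
-- ("CCW","CW")) the port appends raw — those inputs are excluded by Pre_.
def normalize_layer_dirs_py (M_layers : Int) (user_dirs : Option (List String)) : List String :=
  let M := M_layers
  if M ≤ 0 then []
  else
    (PySem.List.pyRange 0 M 1).foldl (fun dirs idx =>
      match user_dirs with
      | some l =>
          if !l.isEmpty && decide (idx < (l.length : Int)) then
            let raw := PySem.Str.upper (PySem.Str.strip (PySem.List.pyGetD l idx ""))
            if raw ≠ "CCW" ∧ raw ≠ "CW" then dirs ++ [raw]  -- ValueError in Python; outside Pre_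
            else dirs ++ [raw]
          else dirs ++ ["CCW"]
      | none => dirs ++ ["CCW"]) []

-- ===== PORT B =====
-- literal port of Source B's recursion `go(k, lst)`; the ValueError on an invalid consumed entry
-- is excluded by Pre_, so the invalid branch returns the same cons as the valid one.
def pvGoB : Nat → List String → List String
  | 0, _ => []
  | Nat.succ k, x :: rest =>
      let raw := PySem.Str.upper (PySem.Str.strip x)
      raw :: pvGoB k rest
  | Nat.succ k, [] => List.replicate (k + 1) "CCW"

def normalize_layer_dirs_py_alt (M_layers : Int) (user_dirs : Option (List String)) : List String :=
  pvGoB M_layers.toNat (user_dirs.getD [])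

-- ===== PRECONDITION & SPEC =====
-- Pre_ excludes exactly the inputs on which Python A raises ValueError: some honored entry
-- (index < min(M, len)) does not strip/upper to "CCW" or "CW".
def Pre_normalize_layer_dirs_py (M_layers : Int) (user_dirs : Option (List String)) : Prop :=
  M_layers ≤ 0 ∨
    ∀ s ∈ (user_dirs.getD []).take (min M_layers.toNat (user_dirs.getD []).length),
        PySem.Str.upper (PySem.Str.strip s) = "CCW" ∨ PySem.Str.upper (PySem.Str.strip s) = "CW"
instance (M_layers : Int) (user_dirs : Option (List String)) : Decidable (Pre_normalize_layer_dirs_py M_layers user_dirs) := by unfold Pre_normalize_layer_dirs_py; infer_instance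

def pvWitness_normalize_layer_dirs_py : Int × Option (List String) := (3, some ["cw ", " ccw"])

def Spec_normalize_layer_dirs_py (M_layers : Int) (user_dirs : Option (List String)) (out : List String) : Prop := out = normalize_layer_dirs_py_alt M_layers user_dirs
instance (M_layers : Int) (user_dirs : Option (List String)) (out : List String) : Decidable (Spec_normalize_layer_dirs_py M_layers user_dirs out) := by unfold Spec_normalize_layer_dirs_py; infer_instance

-- ===== CLAIM (what is proved, stated in full; the proofs are below) =====
def Claim_equal_normalize_layer_dirs_py : Prop := ∀ (M_layers : Int) (user_dirs : Option (List String)), Dom_normalize_layer_dirs_py M_layers user_dirs → Pre_normalize_layer_dirs_py M_layers user_dirs → Spec_normalize_layer_dirs_py M_layers user_dirs (normalize_layer_dirs_py M_layers user_dirs)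

-- ===== LEMMAS AND PROOFS =====

-- A's loop, run for m steps against list l, in closed form.
lemma pvLoopA_eq (l : List String) (m : Nat) :
    (PySem.List.pyRange 0 (m : Int) 1).foldl (fun dirs idx =>
        if !l.isEmpty && decide (idx < (l.length : Int)) then
          let raw := PySem.Str.upper (PySem.Str.strip (PySem.List.pyGetD l idx ""))
          if raw ≠ "CCW" ∧ raw ≠ "CW" then dirs ++ [raw]
          else dirs ++ [raw]
        else dirs ++ ["CCW"]) []
    = ((l.take (min m l.length)).map (fun x => PySem.Str.upper (PySem.Str.strip x)))
        ++ List.replicate (m - min m l.length) "CCW" := by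
  induction m with
  | zero => simp [PySem.List.pyRange_one_eq_nil]
  | succ k ih =>
    have hcast : ((k + 1 : Nat) : Int) = (k : Int) + 1 := by push_cast; ring
    rw [hcast, PySem.List.pyRange_one_succ_right (by positivity), List.foldl_append, ih]
    by_cases hk : k < l.length
    · have hne : l.isEmpty = false := by
        cases l with
        | nil => simp at hk
        | cons a t => simp [List.isEmpty]
      have hlt : ((k : Int) < (l.length : Int)) := by exact_mod_cast hk
      simp only [List.foldl_cons, List.foldl_nil, hne, Bool.not_false, Bool.true_and,
        decide_eq_true_eq, hlt, if_pos, ite_self]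
      have hmin1 : min k l.length = k := by omega
      have hmin2 : min (k + 1) l.length = k + 1 := by omega
      rw [hmin1, hmin2]
      rw [PySem.List.pyGetD_natCast, List.getD_eq_getElem _ _ hk, List.take_add_one]
      simp only [List.map_append, List.map_take, List.getElem?_eq_getElem hk,
        Option.toList_some, List.map_cons, List.map_nil]
      simp
    · have hfalse : (!l.isEmpty && decide ((k : Int) < (l.length : Int))) = false := by
        simp only [Bool.and_eq_false_iff, decide_eq_false_iff_not]
        right; exact_mod_cast hk
      simp only [List.foldl_cons, List.foldl_nil, hfalse, Bool.false_eq_true, if_false]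
      have hmin : min k l.length = l.length ∧ min (k + 1) l.length = l.length := by omega
      rw [hmin.1, hmin.2, List.append_assoc]
      congr 1
      rw [← List.replicate_succ']
      congr 1
      omega

-- constant-body loop (user_dirs = None): m steps of appending "CCW"
lemma pvLoopNone_eq (m : Nat) :
    (PySem.List.pyRange 0 (m : Int) 1).foldl
        (fun (dirs : List String) (_ : Int) => dirs ++ ["CCW"]) []
    = List.replicate m "CCW" := by
  induction m with
  | zero => simp [PySem.List.pyRange_one_eq_nil]
  | succ k ih =>
    have hcast : ((k + 1 : Nat) : Int) = (k : Int) + 1 := by push_cast; ring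
    rw [hcast, PySem.List.pyRange_one_succ_right (by positivity), List.foldl_append, ih,
      List.foldl_cons, List.foldl_nil, ← List.replicate_succ']

-- B's recursion in the same closed form.
lemma pvGoB_eq (k : Nat) (l : List String) :
    pvGoB k l
    = ((l.take (min k l.length)).map (fun x => PySem.Str.upper (PySem.Str.strip x)))
        ++ List.replicate (k - min k l.length) "CCW" := by
  induction k generalizing l with
  | zero => simp [pvGoB]
  | succ j ih =>
    cases l with
    | nil => simp [pvGoB]
    | cons x rest =>
      rw [pvGoB, ih rest]
      have hmin : min (j + 1) (x :: rest).length = min j rest.length + 1 := by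
        simp only [List.length_cons]; omega
      rw [hmin, List.take_succ_cons, List.map_cons, List.cons_append]
      congr 2
      congr 1
      omega

-- ===== VERDICT (by name: the statement is the Claim_ definition above) =====
theorem normalize_layer_dirs_py_spec : Claim_equal_normalize_layer_dirs_py := by
  intro M user_dirs _ _
  unfold Spec_normalize_layer_dirs_py normalize_layer_dirs_py normalize_layer_dirs_py_alt
  by_cases hM : M ≤ 0
  · have : M.toNat = 0 := by omega
    simp [hM, this, pvGoB]
  · simp only [hM, if_false]
    obtain ⟨m, rfl⟩ : ∃ m : Nat, M = (m : Int) := ⟨M.toNat, by omega⟩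
    have ht : ((m : Int)).toNat = m := by omega
    cases user_dirs with
    | none =>
        rw [pvLoopNone_eq, ht]
        have := pvGoB_eq m []
        simp at this
        simp [this]
    | some l =>
        rw [pvLoopA_eq, ht]
        simp [pvGoB_eq]
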